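-- pv_equiv track=rewrite | github.com/SoylentAquamarine/ClamBakeSanta | plugins/adapters/wordpress.py | _build_post
-- ===== SOURCE A (Python) =====
-- def _build_post(haiku_records: list[dict], date_str: str, base_url: str) -> tuple[str, str, str]:
--     """Return (title, html_content, excerpt) for the WordPress post."""
--     title = f"Clam Bake Santa — {date_str}"
--
--     sections = ""
--     for rec in haiku_records:
--         theme = rec.get("theme", "")
--         display_theme = (
--             f"Happy {theme}" if theme.lower().startswith("birthday") else theme
--         )
--         lines = rec["haiku"].split("\n")
--         poem_lines = [ln.rstrip(",") for ln in lines[:-1]]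
--         hashtag_line = lines[-1] if lines else ""
--
--         poem_html = "<br>\n".join(poem_lines)
--         sections += f"""
-- <div style="margin:2rem 0;padding:1.5rem;background:#fdfaf5;border-left:4px solid #2c6e49;border-radius:4px;">
--   <h3 style="margin:0 0 0.8rem;color:#2c6e49;font-size:1rem;text-transform:uppercase;
--              letter-spacing:0.05em;">{display_theme}</h3>
--   <p style="margin:0 0 0.5rem;font-family:Georgia,serif;font-size:1.1rem;line-height:1.9;">
--     {poem_html}
--   </p>
--   <p style="margin:0;color:#666;font-size:0.85rem;">{hashtag_line}</p>
-- </div>"""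
--
--     footer = (
--         f'<hr style="margin:2rem 0;border:none;border-top:1px solid #e0d9cc;">'
--         f'<p style="color:#666;font-size:0.85rem;text-align:center;">'
--         f'View the full archive at <a href="{base_url}">{base_url}</a><br>'
--         f'Subscribe to the email list: send SUBSCRIBE to clambakesanta@gmail.com</p>'
--     )
--
--     # Clean plain-text excerpt for the WordPress blog index page
--     excerpt_lines = []
--     for rec in haiku_records:
--         theme = rec.get("theme", "")
--         display_theme = (
--             f"Happy {theme}" if theme.lower().startswith("birthday") else theme
--         )
--         lines = rec["haiku"].split("\n")
--         poem_lines = [ln.rstrip(",") for ln in lines[:3]]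
--         excerpt_lines.append(f"{display_theme}: {' / '.join(poem_lines)}")
--     excerpt = "\n".join(excerpt_lines)
--
--     return title, sections + footer, excerpt
-- ===== SOURCE B (Python) =====
-- def _render_record(rec):
--     """Render one haiku record as (html_section, excerpt_line)."""
--     theme = rec.get("theme", "")
--     display = f"Happy {theme}" if theme.lower().startswith("birthday") else theme
--     lines = rec["haiku"].split("\n")
--     poem = [ln.rstrip(",") for ln in lines]
--     poem_html = "<br>\n".join(poem[:-1])
--     section = (
--         '\n<div style="margin:2rem 0;padding:1.5rem;background:#fdfaf5;'
--         'border-left:4px solid #2c6e49;border-radius:4px;">\n'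
--         '  <h3 style="margin:0 0 0.8rem;color:#2c6e49;font-size:1rem;text-transform:uppercase;\n'
--         f'             letter-spacing:0.05em;">{display}</h3>\n'
--         '  <p style="margin:0 0 0.5rem;font-family:Georgia,serif;font-size:1.1rem;line-height:1.9;">\n'
--         f'    {poem_html}\n'
--         '  </p>\n'
--         f'  <p style="margin:0;color:#666;font-size:0.85rem;">{lines[-1]}</p>\n'
--         '</div>'
--     )
--     excerpt_line = f"{display}: {' / '.join(poem[:3])}"
--     return section, excerpt_line
--
--
-- def _build_post(haiku_records: list[dict], date_str: str, base_url: str) -> tuple[str, str, str]: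
--     """Return (title, html_content, excerpt) for the WordPress post."""
--     rendered = [_render_record(rec) for rec in haiku_records]
--     footer = (
--         f'<hr style="margin:2rem 0;border:none;border-top:1px solid #e0d9cc;">'
--         f'<p style="color:#666;font-size:0.85rem;text-align:center;">'
--         f'View the full archive at <a href="{base_url}">{base_url}</a><br>'
--         f'Subscribe to the email list: send SUBSCRIBE to clambakesanta@gmail.com</p>'
--     )
--     return (
--         f"Clam Bake Santa — {date_str}",
--         "".join(section for section, _ in rendered) + footer,
--         "\n".join(line for _, line in rendered),
--     )
-- ===== Notes on version B (the rewrite author's own statement) =====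
-- stated objective: simpler
-- what changed: A's two separate loops over haiku_records (one accumulating HTML sections by +=, one building excerpt lines) are fused into a single per-record helper mapped once, with each line rstripped once and both outputs assembled by join.
import Mathlib
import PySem

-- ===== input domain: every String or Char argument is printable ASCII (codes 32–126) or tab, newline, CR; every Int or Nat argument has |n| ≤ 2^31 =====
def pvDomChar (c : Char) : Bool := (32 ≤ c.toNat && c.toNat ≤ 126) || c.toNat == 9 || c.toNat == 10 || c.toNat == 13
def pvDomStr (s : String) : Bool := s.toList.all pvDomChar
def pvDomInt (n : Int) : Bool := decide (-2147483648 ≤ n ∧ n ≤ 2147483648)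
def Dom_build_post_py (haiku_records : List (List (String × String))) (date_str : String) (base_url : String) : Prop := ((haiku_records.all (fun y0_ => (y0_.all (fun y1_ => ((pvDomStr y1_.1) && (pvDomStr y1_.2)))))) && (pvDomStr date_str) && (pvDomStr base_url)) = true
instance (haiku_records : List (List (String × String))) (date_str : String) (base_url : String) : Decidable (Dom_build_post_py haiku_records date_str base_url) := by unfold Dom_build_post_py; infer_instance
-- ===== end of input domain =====

-- B fuses A's two loops over haiku_records into one per-record helper mapped once
-- (each section/excerpt pair computed together, then joined); objective: simpler.

-- hand port of Python's s.rstrip(",") — exact for the single-character strip set ",":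
-- drop trailing ',' characters.
def pvRstripComma (s : String) : String :=
  String.ofList ((s.toList.reverse.dropWhile (fun c => c == ',')).reverse)

-- the literal pieces of the HTML templates shared by both Python sources
def pvSectionPre1 : String := "\n<div style=\"margin:2rem 0;padding:1.5rem;background:#fdfaf5;border-left:4px solid #2c6e49;border-radius:4px;\">\n  <h3 style=\"margin:0 0 0.8rem;color:#2c6e49;font-size:1rem;text-transform:uppercase;\n             letter-spacing:0.05em;\">"
def pvSectionPre2 : String := "</h3>\n  <p style=\"margin:0 0 0.5rem;font-family:Georgia,serif;font-size:1.1rem;line-height:1.9;\">\n    "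
def pvSectionPre3 : String := "\n  </p>\n  <p style=\"margin:0;color:#666;font-size:0.85rem;\">"
def pvSectionPost : String := "</p>\n</div>"
def pvFooter (base_url : String) : String :=
  "<hr style=\"margin:2rem 0;border:none;border-top:1px solid #e0d9cc;\"><p style=\"color:#666;font-size:0.85rem;text-align:center;\">View the full archive at <a href=\"" ++ base_url ++ "\">" ++ base_url ++ "</a><br>Subscribe to the email list: send SUBSCRIBE to clambakesanta@gmail.com</p>"

-- ===== PORT A =====
-- rec["haiku"] is ported as a defaulted lookup; Pre_ guarantees the key is present.
def build_post_py (haiku_records : List (List (String × String))) (date_str : String) (base_url : String) : String × String × String :=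
  let title := "Clam Bake Santa — " ++ date_str
  let sections := haiku_records.foldl (fun sections rec =>
    let theme := (PySem.Dict.mk rec).getD "theme" ""
    let display_theme := if PySem.Str.startswith (PySem.Str.lower theme) "birthday" then "Happy " ++ theme else theme
    let lines := (PySem.Str.split? ((PySem.Dict.mk rec).getD "haiku" "") "\n").getD []
    let poem_lines := (PySem.List.slice lines none (some (-1))).map pvRstripComma
    let hashtag_line := if lines ≠ [] then PySem.List.pyGetD lines (-1) "" else ""
    let poem_html := PySem.Str.join "<br>\n" poem_lines
    sections ++ (pvSectionPre1 ++ display_theme ++ pvSectionPre2 ++ poem_html ++ pvSectionPre3 ++ hashtag_line ++ pvSectionPost)) ""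
  let footer := pvFooter base_url
  let excerpt_lines := haiku_records.foldl (fun excerpt_lines rec =>
    let theme := (PySem.Dict.mk rec).getD "theme" ""
    let display_theme := if PySem.Str.startswith (PySem.Str.lower theme) "birthday" then "Happy " ++ theme else theme
    let lines := (PySem.Str.split? ((PySem.Dict.mk rec).getD "haiku" "") "\n").getD []
    let poem_lines := (PySem.List.slice lines none (some 3)).map pvRstripComma
    excerpt_lines ++ [display_theme ++ ": " ++ PySem.Str.join " / " poem_lines]) []
  let excerpt := PySem.Str.join "\n" excerpt_lines
  (title, sections ++ footer, excerpt)

-- ===== PORT B =====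
def pvRenderRecord (rec : List (String × String)) : String × String :=
  let theme := (PySem.Dict.mk rec).getD "theme" ""
  let display := if PySem.Str.startswith (PySem.Str.lower theme) "birthday" then "Happy " ++ theme else theme
  let lines := (PySem.Str.split? ((PySem.Dict.mk rec).getD "haiku" "") "\n").getD []
  let poem := lines.map pvRstripComma
  let poem_html := PySem.Str.join "<br>\n" (PySem.List.slice poem none (some (-1)))
  let sec := pvSectionPre1 ++ display ++ pvSectionPre2 ++ poem_html ++ pvSectionPre3 ++ PySem.List.pyGetD lines (-1) "" ++ pvSectionPost
  (sec, display ++ ": " ++ PySem.Str.join " / " (PySem.List.slice poem none (some 3)))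

def build_post_py_alt (haiku_records : List (List (String × String))) (date_str : String) (base_url : String) : String × String × String :=
  let rendered := haiku_records.map pvRenderRecord
  let footer := pvFooter base_url
  ("Clam Bake Santa — " ++ date_str,
   PySem.Str.join "" (rendered.map (fun p => p.1)) ++ footer,
   PySem.Str.join "\n" (rendered.map (fun p => p.2)))

-- ===== PRECONDITION & SPEC =====
-- Pre_ excludes records without a "haiku" key, on which Python A raises KeyError.
def Pre_build_post_py (haiku_records : List (List (String × String))) (date_str : String) (base_url : String) : Prop :=
  ∀ rec ∈ haiku_records, "haiku" ∈ rec.map Prod.fst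
instance (haiku_records : List (List (String × String))) (date_str : String) (base_url : String) : Decidable (Pre_build_post_py haiku_records date_str base_url) := by unfold Pre_build_post_py; infer_instance

def pvWitness_build_post_py : (List (List (String × String))) × String × String :=
  ([[("theme", "birthday Bob"), ("haiku", "clams on the shore,\nsteam rises, santa laughs\nsalt wind\n#clambake")],
    [("haiku", "one line")]], "2024-12-24", "https://example.com")

def Spec_build_post_py (haiku_records : List (List (String × String))) (date_str : String) (base_url : String) (out : String × String × String) : Prop := out = build_post_py_alt haiku_records date_str base_url
instance (haiku_records : List (List (String × String))) (date_str : String) (base_url : String) (out : String × String × String) : Decidable (Spec_build_post_py haiku_records date_str base_url out) := by unfold Spec_build_post_py; infer_instance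

-- ===== CLAIM (what is proved, stated in full; the proofs are below) =====
def Claim_equal_build_post_py : Prop := ∀ (haiku_records : List (List (String × String))) (date_str : String) (base_url : String), Dom_build_post_py haiku_records date_str base_url → Pre_build_post_py haiku_records date_str base_url → Spec_build_post_py haiku_records date_str base_url (build_post_py haiku_records date_str base_url)

-- ===== LEMMAS AND PROOFS =====

theorem pv_join_nil_cons (a : String) (rest : List String) :
    PySem.Str.join "" (a :: rest) = a ++ PySem.Str.join "" rest := by
  cases rest with
  | nil => simp [PySem.Str.join, PySem.Chars.join, List.intercalate]
  | cons y t => simp [PySem.Str.join, PySem.Chars.join, List.intercalate, String.ofList_append]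

theorem pv_foldl_append_eq_join {α : Type} (f : α → String) :
    ∀ (l : List α) (init : String),
      l.foldl (fun acc x => acc ++ f x) init = init ++ PySem.Str.join "" (l.map f) := by
  intro l
  induction l with
  | nil => intro init; simp [PySem.Str.join, PySem.Chars.join, List.intercalate]
  | cons x t ih =>
      intro init
      simp only [List.foldl_cons, List.map_cons, pv_join_nil_cons]
      rw [ih, String.append_assoc]

theorem pv_slice_neg_one {α : Type} (xs : List α) :
    PySem.List.slice xs none (some (-1)) = xs.dropLast := by
  simp [PySem.List.slice, ← List.dropLast_eq_take]

theorem pv_slice_three {α : Type} (xs : List α) :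
    PySem.List.slice xs none (some 3) = xs.take 3 := by
  simp [PySem.List.slice]

theorem pv_hashtag_eq (lines : List String) :
    (if lines ≠ [] then PySem.List.pyGetD lines (-1) "" else "") = PySem.List.pyGetD lines (-1) "" := by
  split_ifs with h
  · rfl
  · simp at h; subst h; simp [PySem.List.pyGetD, PySem.List.pyGet?]

theorem pv_section_eq (rec : List (String × String)) :
    (let theme := (PySem.Dict.mk rec).getD "theme" ""
     let display_theme := if PySem.Str.startswith (PySem.Str.lower theme) "birthday" then "Happy " ++ theme else theme
     let lines := (PySem.Str.split? ((PySem.Dict.mk rec).getD "haiku" "") "\n").getD []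
     let poem_lines := (PySem.List.slice lines none (some (-1))).map pvRstripComma
     let hashtag_line := if lines ≠ [] then PySem.List.pyGetD lines (-1) "" else ""
     let poem_html := PySem.Str.join "<br>\n" poem_lines
     pvSectionPre1 ++ display_theme ++ pvSectionPre2 ++ poem_html ++ pvSectionPre3 ++ hashtag_line ++ pvSectionPost)
    = (pvRenderRecord rec).1 := by
  simp only [pvRenderRecord, pv_slice_neg_one, pv_hashtag_eq, List.map_dropLast]

theorem pv_excerpt_eq (rec : List (String × String)) :
    (let theme := (PySem.Dict.mk rec).getD "theme" ""
     let display_theme := if PySem.Str.startswith (PySem.Str.lower theme) "birthday" then "Happy " ++ theme else theme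
     let lines := (PySem.Str.split? ((PySem.Dict.mk rec).getD "haiku" "") "\n").getD []
     let poem_lines := (PySem.List.slice lines none (some 3)).map pvRstripComma
     display_theme ++ ": " ++ PySem.Str.join " / " poem_lines)
    = (pvRenderRecord rec).2 := by
  simp only [pvRenderRecord, pv_slice_three, List.map_take]

-- ===== VERDICT (by name: the statement is the Claim_ definition above) =====
set_option maxRecDepth 4000 in
theorem build_post_py_spec : Claim_equal_build_post_py := by
  intro haiku_records date_str base_url _ _
  unfold Spec_build_post_py
  simp only [build_post_py, build_post_py_alt]
  refine Prod.ext rfl (Prod.ext ?_ ?_)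
  · refine congrArg (fun s => s ++ pvFooter base_url) ?_
    rw [pv_foldl_append_eq_join
        (fun rec =>
          let theme := (PySem.Dict.mk rec).getD "theme" ""
          let display_theme := if PySem.Str.startswith (PySem.Str.lower theme) "birthday" then "Happy " ++ theme else theme
          let lines := (PySem.Str.split? ((PySem.Dict.mk rec).getD "haiku" "") "\n").getD []
          let poem_lines := (PySem.List.slice lines none (some (-1))).map pvRstripComma
          let hashtag_line := if lines ≠ [] then PySem.List.pyGetD lines (-1) "" else ""
          let poem_html := PySem.Str.join "<br>\n" poem_lines
          pvSectionPre1 ++ display_theme ++ pvSectionPre2 ++ poem_html ++ pvSectionPre3 ++ hashtag_line ++ pvSectionPost)]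
    simp only [String.empty_append, List.map_map]
    exact congrArg (PySem.Str.join "") (List.map_congr_left (fun rec _ => pv_section_eq rec))
  · refine congrArg (PySem.Str.join "\n") ?_
    rw [PySem.List.foldl_append_singleton_eq_map
        (fun rec =>
          let theme := (PySem.Dict.mk rec).getD "theme" ""
          let display_theme := if PySem.Str.startswith (PySem.Str.lower theme) "birthday" then "Happy " ++ theme else theme
          let lines := (PySem.Str.split? ((PySem.Dict.mk rec).getD "haiku" "") "\n").getD []
          let poem_lines := (PySem.List.slice lines none (some 3)).map pvRstripComma
          display_theme ++ ": " ++ PySem.Str.join " / " poem_lines)]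
    simp only [List.nil_append, List.map_map]
    exact List.map_congr_left (fun rec _ => pv_excerpt_eq rec)
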